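-- pv_equiv track=rewrite | github.com/plasmashen/lujiachun | game/catch_bad_guy_expected_value.py | get_lucky_prize
-- ===== SOURCE A (Python) =====
-- PRIZES_LUCKY = {
--     2: 80, 3: 120, 4: 200, 5: 350, 6: 500,
--     7: 700, 8: 900, 9: 2100, 10: 3000
-- }
--
-- def get_lucky_prize(lucky_count):
--     if lucky_count < 2:
--         return 5
--     best = 5
--     for lc, prize in PRIZES_LUCKY.items():
--         if lc <= lucky_count:
--             best = max(best, prize)
--     return best
-- ===== SOURCE B (Python) =====
-- # Prize steps listed highest-first: the answer is the prize of the first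
-- # threshold not exceeding lucky_count (first match wins since prizes grow
-- # with the key), falling back to 5.
-- PRIZE_STEPS = [
--     (10, 3000), (9, 2100), (8, 900), (7, 700), (6, 500),
--     (5, 350), (4, 200), (3, 120), (2, 80),
-- ]
--
-- def get_lucky_prize(lucky_count):
--     for threshold, prize in PRIZE_STEPS:
--         if threshold <= lucky_count:
--             return prize
--     return 5
-- ===== Notes on version B (the rewrite author's own statement) =====
-- stated objective: alternative
-- what changed: Replaces the dict scan with max-accumulator by a first-match early-return walk down a descending threshold list (valid since prizes increase with the key), with the default prize as the exhausted-list base case instead of a guard and an accumulator.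
import Mathlib
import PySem

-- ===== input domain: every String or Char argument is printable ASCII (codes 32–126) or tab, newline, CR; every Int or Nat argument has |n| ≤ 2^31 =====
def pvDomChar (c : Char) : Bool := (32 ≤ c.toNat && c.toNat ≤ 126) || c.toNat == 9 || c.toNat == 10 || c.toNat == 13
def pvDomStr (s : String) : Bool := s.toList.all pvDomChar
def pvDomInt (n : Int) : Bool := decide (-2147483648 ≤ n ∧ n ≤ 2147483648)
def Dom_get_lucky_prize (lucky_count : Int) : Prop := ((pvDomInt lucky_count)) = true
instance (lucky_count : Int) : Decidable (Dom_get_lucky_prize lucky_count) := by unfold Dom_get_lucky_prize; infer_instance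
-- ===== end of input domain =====

-- B replaces A's guarded dict scan with a running max by an early-return walk
-- down a descending threshold list (first match wins because prizes increase
-- with the key); objective: alternative decomposition.

-- ===== PORT A =====
def PRIZES_LUCKY : PySem.Dict Int Int := PySem.Dict.ofList
  [(2, 80), (3, 120), (4, 200), (5, 350), (6, 500),
   (7, 700), (8, 900), (9, 2100), (10, 3000)]

def get_lucky_prize (lucky_count : Int) : Int :=
  if lucky_count < 2 then 5
  else
    (PySem.Dict.items PRIZES_LUCKY).foldl
      (fun best lp => if lp.1 ≤ lucky_count then max best lp.2 else best) 5

-- ===== PORT B =====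
def PRIZE_STEPS : List (Int × Int) :=
  [(10, 3000), (9, 2100), (8, 900), (7, 700), (6, 500),
   (5, 350), (4, 200), (3, 120), (2, 80)]

-- the for-loop with early return: first threshold ≤ n wins, exhausted list gives 5
def pickPrize : List (Int × Int) → Int → Int
  | [], _ => 5
  | (t, p) :: rest, n => if t ≤ n then p else pickPrize rest n

def get_lucky_prize_alt (lucky_count : Int) : Int :=
  pickPrize PRIZE_STEPS lucky_count

-- ===== PRECONDITION & SPEC =====
def Spec_get_lucky_prize (lucky_count : Int) (out : Int) : Prop := out = get_lucky_prize_alt lucky_count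
instance (lucky_count : Int) (out : Int) : Decidable (Spec_get_lucky_prize lucky_count out) := by unfold Spec_get_lucky_prize; infer_instance

-- ===== CLAIM (what is proved, stated in full; the proofs are below) =====
def Claim_equal_get_lucky_prize : Prop := ∀ (lucky_count : Int), Dom_get_lucky_prize lucky_count → Spec_get_lucky_prize lucky_count (get_lucky_prize lucky_count)

-- ===== LEMMAS AND PROOFS =====

theorem big_case (lc : Int) (h : 10 ≤ lc) :
    get_lucky_prize lc = 3000 ∧ get_lucky_prize_alt lc = 3000 := by
  have h2 : ¬ lc < 2 := by omega
  have hitems : (PySem.Dict.items PRIZES_LUCKY) =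
      [(2, 80), (3, 120), (4, 200), (5, 350), (6, 500),
       (7, 700), (8, 900), (9, 2100), (10, 3000)] := by decide
  constructor
  · rw [get_lucky_prize, if_neg h2, hitems]
    simp only [List.foldl]
    rw [if_pos (show (2:Int) ≤ lc by omega), if_pos (show (3:Int) ≤ lc by omega),
      if_pos (show (4:Int) ≤ lc by omega), if_pos (show (5:Int) ≤ lc by omega),
      if_pos (show (6:Int) ≤ lc by omega), if_pos (show (7:Int) ≤ lc by omega),
      if_pos (show (8:Int) ≤ lc by omega), if_pos (show (9:Int) ≤ lc by omega),
      if_pos (show (10:Int) ≤ lc by omega)]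
    decide
  · rw [get_lucky_prize_alt, PRIZE_STEPS, pickPrize, if_pos h]

theorem small_case (lc : Int) (h : lc < 2) : get_lucky_prize_alt lc = 5 := by
  rw [get_lucky_prize_alt, PRIZE_STEPS]
  rw [pickPrize, if_neg (by omega : ¬ (10:Int) ≤ lc)]
  rw [pickPrize, if_neg (by omega : ¬ (9:Int) ≤ lc)]
  rw [pickPrize, if_neg (by omega : ¬ (8:Int) ≤ lc)]
  rw [pickPrize, if_neg (by omega : ¬ (7:Int) ≤ lc)]
  rw [pickPrize, if_neg (by omega : ¬ (6:Int) ≤ lc)]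
  rw [pickPrize, if_neg (by omega : ¬ (5:Int) ≤ lc)]
  rw [pickPrize, if_neg (by omega : ¬ (4:Int) ≤ lc)]
  rw [pickPrize, if_neg (by omega : ¬ (3:Int) ≤ lc)]
  rw [pickPrize, if_neg (by omega : ¬ (2:Int) ≤ lc)]
  rw [pickPrize]

-- ===== VERDICT (by name: the statement is the Claim_ definition above) =====
theorem get_lucky_prize_spec : Claim_equal_get_lucky_prize := by
  intro lc _
  unfold Spec_get_lucky_prize
  by_cases h10 : 10 ≤ lc
  · obtain ⟨ha, hb⟩ := big_case lc h10
    rw [ha, hb]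
  · by_cases h2 : lc < 2
    · rw [small_case lc h2]
      simp [get_lucky_prize, h2]
    · interval_cases lc <;> decide
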